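-- pv_equiv track=rewrite | github.com/anpawo/Video-Code | src/python/serialise.py | commentsToLabel
-- ===== SOURCE A (Python) =====
-- def commentsToLabel(s: str) -> str:
--     if s == "":
--         return ""
--     if s[0:3] != "\n# ":
--         return s[0] + commentsToLabel(s[1:])
--     i = 3
--     while s[i] != "\n":
--         i += 1
--     return f'label("{s[3:i]}")' + commentsToLabel(s[i:])
-- ===== SOURCE B (Python) =====
-- def commentsToLabel(s: str) -> str:
--     first, *rest = s.split("\n")
--     return first + "".join(
--         'label("' + line[2:] + '")' if line.startswith("# ") else "\n" + line
--         for line in rest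
--     )
-- ===== Notes on version B (the rewrite author's own statement) =====
-- stated objective: simpler
-- what changed: Replaces A's character-by-character recursion with an inner while-scan (rebuilding the string one character per recursive call) by a single split on '\n': the first line is kept, each later line starting with '# ' becomes label("..."), other lines are re-joined with their newline.
-- crash fix: On inputs containing '\n# ' with no later newline (an unterminated final comment line) A raises IndexError while scanning for the terminating newline; B returns the string with that final comment converted to label("...") as well. — e.g. on commentsToLabel("\n# hi"): A raises IndexError, B returns "label(\"hi\")"
import Mathlib
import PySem

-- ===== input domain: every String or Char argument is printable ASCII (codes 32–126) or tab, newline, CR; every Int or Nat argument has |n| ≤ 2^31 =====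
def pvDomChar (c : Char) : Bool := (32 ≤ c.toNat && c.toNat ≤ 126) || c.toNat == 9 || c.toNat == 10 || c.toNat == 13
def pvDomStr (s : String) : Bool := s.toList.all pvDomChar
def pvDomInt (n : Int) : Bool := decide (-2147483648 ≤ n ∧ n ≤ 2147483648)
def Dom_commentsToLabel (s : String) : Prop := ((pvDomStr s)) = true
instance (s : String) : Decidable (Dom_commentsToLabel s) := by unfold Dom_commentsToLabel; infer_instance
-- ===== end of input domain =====

-- B replaces A's character-by-character recursion (with an inner index scan) by a split-on-newline
-- pass over whole lines: simpler and a single pass. Equivalence is claimed on the return value only.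

-- ===== PORT A =====

-- the 'i = 3; while s[i] != "\n": i += 1' scan: returns (s[3:i], s[i:]) of the list passed
-- (which is s[3:]); none exactly where Python raises IndexError (no later newline).
def pvSpanNl : List Char → Option (List Char × List Char)
  | [] => none
  | c :: t =>
    if c = '\n' then some ([], c :: t)
    else match pvSpanNl t with
         | none => none
         | some (a, b) => some (c :: a, b)

theorem pvSpanNl_length : ∀ (t a b : List Char), pvSpanNl t = some (a, b) → b.length ≤ t.length := by
  intro t
  induction t with
  | nil => intro a b h; simp [pvSpanNl] at h
  | cons c r ih =>
    intro a b h
    simp only [pvSpanNl] at h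
    split at h
    · obtain ⟨rfl, rfl⟩ : [] = a ∧ c :: r = b := by simpa using h
      simp
    · cases hs : pvSpanNl r with
      | none => rw [hs] at h; simp at h
      | some p =>
        rw [hs] at h
        obtain ⟨a', b'⟩ := p
        simp at h
        have := ih a' b' hs
        obtain ⟨h1, rfl⟩ := h
        simp; omega

def pvA : List Char → List Char
  | [] => []
  | c :: rest =>
    if (c :: rest).take 3 = ['\n', '#', ' '] then
      match h : pvSpanNl ((c :: rest).drop 3) with
      | some (comment, rest') =>
        "label(\"".toList ++ comment ++ "\")".toList ++ pvA rest'
      | none => []   -- IndexError path (excluded by Pre_)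
    else c :: pvA rest
termination_by l => l.length
decreasing_by
  · have := pvSpanNl_length _ _ _ h
    simp at *; omega
  · simp

def commentsToLabel (s : String) : String := String.ofList (pvA s.toList)

-- ===== PORT B =====

-- one line of s.split("\n") after the first
def pvProcLine (line : List Char) : List Char :=
  if PySem.Chars.startswith line ['#', ' '] then
    "label(\"".toList ++ line.drop 2 ++ "\")".toList
  else '\n' :: line

def pvB (cs : List Char) : List Char :=
  match PySem.Chars.splitOn cs ['\n'] with
  | [] => []   -- unreachable: split never returns an empty list
  | first :: rest => first ++ PySem.Chars.join [] (rest.map pvProcLine)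

def commentsToLabel_alt (s : String) : String := String.ofList (pvB s.toList)

-- ===== PRECONDITION & SPEC =====
-- Pre_ excludes exactly the inputs on which A raises IndexError: those containing an occurrence
-- of "\n# " with no later newline (an unterminated final comment line).
def Pre_commentsToLabel (s : String) : Prop :=
  ∀ t ∈ s.toList.tails, ¬ (t.take 3 = ['\n', '#', ' '] ∧ '\n' ∉ t.drop 3)
instance (s : String) : Decidable (Pre_commentsToLabel s) := by unfold Pre_commentsToLabel; infer_instance

def pvWitness_commentsToLabel : String := "a\n# b\nc"

-- On inputs whose last line exists past a "\n# " with no terminating newline, A raises IndexError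
-- (its scan runs off the end); B returns the string with that final comment converted as well.
def Raises_commentsToLabel (s : String) : Prop :=
  ∃ t ∈ s.toList.tails, t.take 3 = ['\n', '#', ' '] ∧ '\n' ∉ t.drop 3
instance (s : String) : Decidable (Raises_commentsToLabel s) := by unfold Raises_commentsToLabel; infer_instance

def pvRaiseWitness_commentsToLabel : String := "\n# hi"
def pvRaiseWitnessOut_commentsToLabel : String := "label(\"hi\")"

def Spec_commentsToLabel (s : String) (out : String) : Prop := out = commentsToLabel_alt s
instance (s : String) (out : String) : Decidable (Spec_commentsToLabel s out) := by unfold Spec_commentsToLabel; infer_instance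

-- ===== CLAIM (what is proved, stated in full; the proofs are below) =====
def Claim_equal_commentsToLabel : Prop := ∀ (s : String), Dom_commentsToLabel s → Pre_commentsToLabel s → Spec_commentsToLabel s (commentsToLabel s)
def Claim_raises_commentsToLabel : Prop := (∀ (s : String), Dom_commentsToLabel s → Raises_commentsToLabel s → ¬ Pre_commentsToLabel s) ∧ (Dom_commentsToLabel (pvRaiseWitness_commentsToLabel) ∧ Raises_commentsToLabel (pvRaiseWitness_commentsToLabel) ∧ commentsToLabel_alt (pvRaiseWitness_commentsToLabel) = pvRaiseWitnessOut_commentsToLabel)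

-- ===== LEMMAS AND PROOFS =====

-- the line decomposition of a character list (s.split("\n"))
def pvLines : List Char → List (List Char)
  | [] => [[]]
  | c :: r => if c = '\n' then [] :: pvLines r else (pvLines r).modifyHead (c :: ·)

theorem pvLines_ne_nil (l : List Char) : pvLines l ≠ [] := by
  cases l with
  | nil => simp [pvLines]
  | cons c r =>
    simp only [pvLines]
    split
    · simp
    · cases h : pvLines r with
      | nil => exact absurd h (pvLines_ne_nil r)
      | cons a t => simp

theorem pvGo_eq : ∀ (fuel : Nat) (l cur : List Char) (acc : List (List Char)), l.length ≤ fuel →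
    PySem.Chars.splitOn.go ['\n'] fuel l cur acc
      = acc.reverse ++ (pvLines l).modifyHead (cur.reverse ++ ·) := by
  intro fuel
  induction fuel with
  | zero =>
    intro l cur acc hl
    have : l = [] := List.length_eq_zero_iff.mp (Nat.le_zero.mp hl)
    subst this
    simp [PySem.Chars.splitOn.go, pvLines]
  | succ n ih =>
    intro l cur acc hl
    cases l with
    | nil => simp [PySem.Chars.splitOn.go, pvLines]
    | cons c r =>
      by_cases hc : c = '\n'
      · subst hc
        rw [show PySem.Chars.splitOn.go ['\n'] (n+1) ('\n' :: r) cur acc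
              = PySem.Chars.splitOn.go ['\n'] n r [] (cur.reverse :: acc) by
            simp [PySem.Chars.splitOn.go, List.isPrefixOf]]
        rw [ih r [] (cur.reverse :: acc) (by simpa using Nat.le_of_succ_le_succ hl)]
        obtain ⟨f, rest, hfr⟩ : ∃ f rest, pvLines r = f :: rest := by
          cases h : pvLines r with
          | nil => exact absurd h (pvLines_ne_nil r)
          | cons a t => exact ⟨a, t, rfl⟩
        simp [pvLines, hfr]
      · rw [show PySem.Chars.splitOn.go ['\n'] (n+1) (c :: r) cur acc
              = PySem.Chars.splitOn.go ['\n'] n r (c :: cur) acc by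
            simp [PySem.Chars.splitOn.go, List.isPrefixOf]
            intro h; exact absurd h.symm hc]
        rw [ih r (c :: cur) acc (by simpa using Nat.le_of_succ_le_succ hl)]
        obtain ⟨f, rest, hfr⟩ : ∃ f rest, pvLines r = f :: rest := by
          cases h : pvLines r with
          | nil => exact absurd h (pvLines_ne_nil r)
          | cons a t => exact ⟨a, t, rfl⟩
        simp [pvLines, hfr, hc]

theorem pvSplitOn_eq (l : List Char) : PySem.Chars.splitOn l ['\n'] = pvLines l := by
  unfold PySem.Chars.splitOn
  rw [pvGo_eq (l.length + 1) l [] [] (by omega)]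
  obtain ⟨f, rest, hfr⟩ : ∃ f rest, pvLines l = f :: rest := by
    cases h : pvLines l with
    | nil => exact absurd h (pvLines_ne_nil l)
    | cons a t => exact ⟨a, t, rfl⟩
  simp [hfr]

theorem pvJoin_nil_flatten (ps : List (List Char)) : PySem.Chars.join [] ps = ps.flatten := by
  unfold PySem.Chars.join
  induction ps with
  | nil => rfl
  | cons a t ih =>
    cases t with
    | nil => simp [List.intercalate]
    | cons b u =>
      simp only [List.intercalate, List.intersperse] at *
      simp_all [List.intercalate]

-- pvB in terms of pvLines
def pvB' (cs : List Char) : List Char :=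
  match pvLines cs with
  | [] => []
  | first :: rest => first ++ (rest.map pvProcLine).flatten

theorem pvB_eq (cs : List Char) : pvB cs = pvB' cs := by
  unfold pvB pvB'
  rw [pvSplitOn_eq]
  cases pvLines cs with
  | nil => rfl
  | cons f rest => simp [pvJoin_nil_flatten]

def pvPreL (l : List Char) : Prop :=
  ∀ t ∈ l.tails, ¬ (t.take 3 = ['\n', '#', ' '] ∧ '\n' ∉ t.drop 3)

theorem pvPreL_suffix {l l' : List Char} (h : l' <:+ l) (hp : pvPreL l) : pvPreL l' := by
  intro t ht
  exact hp t ((List.mem_tails _ _).mpr (((List.mem_tails _ _).mp ht).trans h))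

theorem pvLines_cons_ex (r : List Char) : ∃ f rest, pvLines r = f :: rest := by
  cases h : pvLines r with
  | nil => exact absurd h (pvLines_ne_nil r)
  | cons a t => exact ⟨a, t, rfl⟩

theorem pvLines_headI_cons {c : Char} (hc : c ≠ '\n') (t : List Char) :
    (pvLines (c :: t)).headI = c :: (pvLines t).headI := by
  obtain ⟨f, rest, hfr⟩ := pvLines_cons_ex t
  simp [pvLines, hc, hfr]

theorem pvStarts1 (r : List Char) :
    PySem.Chars.startswith (pvLines r).headI [' '] = true → r.take 1 = [' '] := by
  cases r with
  | nil => simp [pvLines, PySem.Chars.startswith]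
  | cons c t =>
    by_cases hc : c = '\n'
    · subst hc; simp [pvLines, PySem.Chars.startswith]
    · rw [pvLines_headI_cons hc]
      simp only [PySem.Chars.startswith, List.isPrefixOf, Bool.and_eq_true, beq_iff_eq]
      rintro ⟨rfl, -⟩
      simp

theorem pvStarts2 (r : List Char) :
    PySem.Chars.startswith (pvLines r).headI ['#', ' '] = true → r.take 2 = ['#', ' '] := by
  cases r with
  | nil => simp [pvLines, PySem.Chars.startswith]
  | cons c t =>
    by_cases hc : c = '\n'
    · subst hc; simp [pvLines, PySem.Chars.startswith]
    · rw [pvLines_headI_cons hc]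
      simp only [PySem.Chars.startswith, List.isPrefixOf, Bool.and_eq_true, beq_iff_eq]
      rintro ⟨rfl, h2⟩
      have := pvStarts1 t (by simpa [PySem.Chars.startswith] using h2)
      simp [this]

theorem pvB'_nil : pvB' [] = [] := by simp [pvB', pvLines]

theorem pvB'_char {c : Char} (hc : c ≠ '\n') (r : List Char) :
    pvB' (c :: r) = c :: pvB' r := by
  obtain ⟨f, rest, hfr⟩ := pvLines_cons_ex r
  simp [pvB', pvLines, hc, hfr]

theorem pvB'_nl {r : List Char} (h : r.take 2 ≠ ['#', ' ']) :
    pvB' ('\n' :: r) = '\n' :: pvB' r := by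
  obtain ⟨f, rest, hfr⟩ := pvLines_cons_ex r
  have hsw : PySem.Chars.startswith f ['#', ' '] = false := by
    by_contra hx
    have : PySem.Chars.startswith (pvLines r).headI ['#', ' '] = true := by
      rw [hfr]; simpa using Bool.of_not_eq_false hx
    exact h (pvStarts2 r this)
  simp [pvB', pvLines, hfr, pvProcLine, hsw]

theorem pvLines_append_nlfree {a : List Char} (ha : '\n' ∉ a) (r2 : List Char) :
    pvLines (a ++ '\n' :: r2) = a :: pvLines r2 := by
  induction a with
  | nil => simp [pvLines]
  | cons c t ih =>
    have hc : c ≠ '\n' := fun h => ha (h ▸ List.mem_cons_self)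
    have ht : '\n' ∉ t := fun h => ha (List.mem_cons_of_mem _ h)
    simp [pvLines, hc, ih ht]

theorem pvB'_comment {a : List Char} (ha : '\n' ∉ a) (r2 : List Char) :
    pvB' ('\n' :: '#' :: ' ' :: (a ++ '\n' :: r2))
      = "label(\"".toList ++ a ++ "\")".toList ++ pvB' ('\n' :: r2) := by
  have h1 : pvLines (a ++ '\n' :: r2) = a :: pvLines r2 := pvLines_append_nlfree ha r2
  have hsw : PySem.Chars.startswith ('#' :: ' ' :: a) ['#', ' '] = true := by
    simp [PySem.Chars.startswith, List.isPrefixOf]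
  simp [pvB', pvLines, h1, pvProcLine, hsw]

theorem pvSpanNl_decomp : ∀ (q a b : List Char), pvSpanNl q = some (a, b) →
    q = a ++ b ∧ '\n' ∉ a ∧ ∃ r2, b = '\n' :: r2 := by
  intro q
  induction q with
  | nil => intro a b h; simp [pvSpanNl] at h
  | cons c t ih =>
    intro a b h
    simp only [pvSpanNl] at h
    split at h
    · obtain ⟨rfl, rfl⟩ : [] = a ∧ c :: t = b := by simpa using h
      rename_i hc
      subst hc
      exact ⟨rfl, by simp, t, rfl⟩
    · rename_i hc
      cases hs : pvSpanNl t with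
      | none => rw [hs] at h; simp at h
      | some p =>
        rw [hs] at h
        obtain ⟨a', b'⟩ := p
        simp at h
        obtain ⟨rfl, rfl⟩ := h
        obtain ⟨he, hn, r2, hb⟩ := ih a' b' hs
        refine ⟨by simp [he], ?_, r2, hb⟩
        intro hm
        rcases List.mem_cons.mp hm with h | h
        · exact hc h.symm
        · exact hn h

theorem pvSpanNl_some : ∀ (q : List Char), '\n' ∈ q → ∃ p, pvSpanNl q = some p := by
  intro q
  induction q with
  | nil => simp
  | cons c t ih =>
    intro hm
    by_cases hc : c = '\n'
    · exact ⟨([], c :: t), by simp [pvSpanNl, hc]⟩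
    · have : '\n' ∈ t := by
        rcases List.mem_cons.mp hm with h | h
        · exact absurd h.symm hc
        · exact h
      obtain ⟨⟨a, b⟩, hp⟩ := ih this
      exact ⟨(c :: a, b), by simp [pvSpanNl, hc, hp]⟩

theorem pvMain : ∀ (n : Nat) (l : List Char), l.length ≤ n →
    pvPreL l → pvA l = pvB' l := by
  intro n
  induction n with
  | zero =>
    intro l hl _
    have : l = [] := List.length_eq_zero_iff.mp (Nat.le_zero.mp hl)
    subst this
    simp [pvA, pvB'_nil]
  | succ n ih =>
    intro l hl hpre
    cases l with
    | nil => simp [pvA, pvB'_nil]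
    | cons c rest =>
      by_cases hpat : (c :: rest).take 3 = ['\n', '#', ' ']
      · -- comment branch
        have hc : c = '\n' := by
          have := congrArg (fun x => x.headI) hpat
          simpa using this
        subst hc
        obtain ⟨q, hq⟩ : ∃ q, rest = '#' :: ' ' :: q := by
          cases rest with
          | nil => simp at hpat
          | cons d u =>
            cases u with
            | nil => simp at hpat
            | cons e v =>
              simp at hpat
              exact ⟨v, by simp [hpat]⟩
        subst hq
        have hdrop : ('\n' :: '#' :: ' ' :: q).drop 3 = q := rfl
        have hmem : '\n' ∈ q := by
          by_contra hn
          exact hpre ('\n' :: '#' :: ' ' :: q) ((List.mem_tails _ _).mpr (List.suffix_refl _))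
            ⟨hpat, by simpa [hdrop] using hn⟩
        obtain ⟨⟨a, b⟩, hspan⟩ := pvSpanNl_some q hmem
        obtain ⟨he, hnf, r2, hb⟩ := pvSpanNl_decomp q a b hspan
        subst hb
        have hAeq : pvA ('\n' :: '#' :: ' ' :: q)
            = "label(\"".toList ++ a ++ "\")".toList ++ pvA ('\n' :: r2) := by
          rw [pvA]
          rw [if_pos hpat]
          split
          · rename_i comment rest' hx
            rw [hdrop, hspan] at hx
            obtain ⟨rfl, rfl⟩ : a = comment ∧ '\n' :: r2 = rest' := by simpa using hx
            rfl
          · rename_i hx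
            rw [hdrop, hspan] at hx
            simp at hx
        have hsuf : ('\n' :: r2) <:+ ('\n' :: '#' :: ' ' :: q) := by
          refine List.IsSuffix.trans ?_ (by exact ⟨['\n', '#', ' '], rfl⟩)
          exact ⟨a, he.symm⟩
        have hlen : ('\n' :: r2).length ≤ n := by
          have hq : q.length = a.length + r2.length + 1 := by
            rw [he]; simp; omega
          simp at hl ⊢
          omega
        rw [hAeq, he, pvB'_comment hnf r2, ih ('\n' :: r2) hlen (pvPreL_suffix hsuf hpre)]
      · -- plain character branch
        have hrest : pvA (c :: rest) = c :: pvA rest := by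
          rw [pvA]
          rw [if_neg hpat]
        have hsuf : rest <:+ (c :: rest) := ⟨[c], rfl⟩
        have hih := ih rest (by simp at hl; omega) (pvPreL_suffix hsuf hpre)
        by_cases hc : c = '\n'
        · subst hc
          have htk : rest.take 2 ≠ ['#', ' '] := by
            intro hx
            apply hpat
            cases rest with
            | nil => simp at hx
            | cons d u =>
              cases u with
              | nil => simp at hx
              | cons e v => simp at hx ⊢; exact hx
          rw [hrest, hih, pvB'_nl htk]
        · rw [hrest, hih, pvB'_char hc rest]

-- ===== VERDICT (by name: the statement is the Claim_ definition above) =====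
theorem commentsToLabel_spec : Claim_equal_commentsToLabel := by
  intro s _ hpre
  unfold Spec_commentsToLabel commentsToLabel commentsToLabel_alt
  rw [pvB_eq]
  exact congrArg String.ofList (pvMain s.toList.length s.toList le_rfl hpre)

theorem commentsToLabel_raises : Claim_raises_commentsToLabel := by
  unfold Claim_raises_commentsToLabel
  constructor
  · intro s _ hr hp
    obtain ⟨t, ht, h1, h2⟩ := hr
    exact hp t ht ⟨h1, h2⟩
  · refine ⟨by decide, by decide, by decide⟩

-- self-check: the raise witness indeed lies outside Pre_ (corollary of commentsToLabel_raises)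
theorem pvRaiseWitness_not_pre_ok : ¬ Pre_commentsToLabel pvRaiseWitness_commentsToLabel :=
  commentsToLabel_raises.1 pvRaiseWitness_commentsToLabel (by decide) commentsToLabel_raises.2.2.1
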